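-- pv_equiv track=rewrite | github.com/astrigac/VUT-FIT | ISJ/isj_proj3_xstrig00.py | first_odd_or_even
-- ===== SOURCE A (Python) =====
-- def first_odd_or_even(numbers):
--     """Returns 0 if there is the same number of even numbers and odd numbers
--        in the input list of ints, or there are only odd or only even numbers.
--        Returns the first odd number in the input list if the list has more even
--        numbers.
--        Returns the first even number in the input list if the list has more odd
--        numbers.
--
--     >>> first_odd_or_even([2,4,2,3,6])
--     3
--     >>> first_odd_or_even([3,5,4])
--     4
--     >>> first_odd_or_even([2,4,3,5])
--     0
--     >>> first_odd_or_even([2,4])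
--     0
--     >>> first_odd_or_even([3])
--     0
--     """
--
--     first_odd = 0
--     first_even = 0
--     odd_cnt = 0
--     even_cnt = 0
--     for num in numbers:
--         if(num%2 == 0):
--             if(even_cnt == 0):
--                 first_even = num
--             even_cnt += 1
--         else:
--             if(odd_cnt ==0):
--                 first_odd = num
--             odd_cnt += 1
--
--     if(odd_cnt == 0 or even_cnt == 0 or odd_cnt == even_cnt):
--         return 0
--     elif(even_cnt > odd_cnt):
--         return first_odd
--     else:
--         return first_even
-- ===== SOURCE B (Python) =====
-- def first_odd_or_even(numbers):
--     evens = [n for n in numbers if n % 2 == 0]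
--     odds = [n for n in numbers if n % 2 != 0]
--     if not evens or not odds or len(evens) == len(odds):
--         return 0
--     return odds[0] if len(evens) > len(odds) else evens[0]
-- ===== Notes on version B (the rewrite author's own statement) =====
-- stated objective: simpler
-- what changed: B partitions the list into evens and odds with two filters and decides from the lists' lengths and heads, replacing A's single loop that maintains counters and first-element sentinels.
import Mathlib
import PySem

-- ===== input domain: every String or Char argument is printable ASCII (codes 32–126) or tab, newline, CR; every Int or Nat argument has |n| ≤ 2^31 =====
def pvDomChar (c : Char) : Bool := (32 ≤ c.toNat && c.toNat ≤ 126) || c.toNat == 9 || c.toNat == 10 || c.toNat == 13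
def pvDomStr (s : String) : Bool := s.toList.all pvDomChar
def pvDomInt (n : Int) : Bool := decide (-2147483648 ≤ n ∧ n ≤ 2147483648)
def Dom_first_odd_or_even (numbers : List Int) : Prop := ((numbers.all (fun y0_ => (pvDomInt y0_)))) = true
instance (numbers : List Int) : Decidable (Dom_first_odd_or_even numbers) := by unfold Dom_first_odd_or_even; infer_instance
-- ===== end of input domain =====

-- B partitions the list into evens/odds with two filters and decides from their lengths and heads, instead of A's counter-and-sentinel loop (objective: simpler; not faster).


-- ===== PORT A =====
-- loop of A: state (first_odd, first_even, odd_cnt, even_cnt)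
def foeLoop : List Int → Int → Int → Int → Int → Int × Int × Int × Int
  | [], fo, fe, oc, ec => (fo, fe, oc, ec)
  | num :: t, fo, fe, oc, ec =>
    if PySem.Int.mod num 2 == 0 then
      foeLoop t fo (if ec = 0 then num else fe) oc (ec + 1)
    else
      foeLoop t (if oc = 0 then num else fo) fe (oc + 1) ec

def first_odd_or_even (numbers : List Int) : Int :=
  let (fo, fe, oc, ec) := foeLoop numbers 0 0 0 0
  if oc = 0 ∨ ec = 0 ∨ oc = ec then 0
  else if ec > oc then fo
  else fe

-- ===== PORT B =====
def first_odd_or_even_alt (numbers : List Int) : Int :=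
  let evens := numbers.filter (fun n => PySem.Int.mod n 2 == 0)
  let odds := numbers.filter (fun n => !(PySem.Int.mod n 2 == 0))
  if evens.isEmpty || odds.isEmpty || evens.length == odds.length then 0
  else if evens.length > odds.length then odds.headD 0  -- odds[0]: odds nonempty here
  else evens.headD 0  -- evens[0]: evens nonempty here

-- ===== PRECONDITION & SPEC =====
def Spec_first_odd_or_even (numbers : List Int) (out : Int) : Prop := out = first_odd_or_even_alt numbers
instance (numbers : List Int) (out : Int) : Decidable (Spec_first_odd_or_even numbers out) := by unfold Spec_first_odd_or_even; infer_instance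

-- ===== CLAIM (what is proved, stated in full; the proofs are below) =====
def Claim_equal_first_odd_or_even : Prop := ∀ (numbers : List Int), Dom_first_odd_or_even numbers → Spec_first_odd_or_even numbers (first_odd_or_even numbers)

-- ===== LEMMAS AND PROOFS =====

-- characterisation of A's loop from a state with nonnegative counters
theorem foeLoop_eq (l : List Int) : ∀ (fo fe oc ec : Int), 0 ≤ oc → 0 ≤ ec →
    foeLoop l fo fe oc ec =
      ((if oc = 0 then (l.filter (fun n => !(PySem.Int.mod n 2 == 0))).headD fo else fo),
       (if ec = 0 then (l.filter (fun n => PySem.Int.mod n 2 == 0)).headD fe else fe),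
       oc + (l.filter (fun n => !(PySem.Int.mod n 2 == 0))).length,
       ec + (l.filter (fun n => PySem.Int.mod n 2 == 0)).length) := by
  induction l with
  | nil => intro fo fe oc ec _ _; simp [foeLoop]
  | cons num t ih =>
    intro fo fe oc ec hoc hec
    by_cases h : (PySem.Int.mod num 2 == 0) = true
    · have step : foeLoop (num :: t) fo fe oc ec
          = foeLoop t fo (if ec = 0 then num else fe) oc (ec + 1) := by
        show (if (PySem.Int.mod num 2 == 0) = true
            then foeLoop t fo (if ec = 0 then num else fe) oc (ec + 1)
            else foeLoop t (if oc = 0 then num else fo) fe (oc + 1) ec) = _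
        rw [if_pos h]
      have hf1 : (num :: t).filter (fun n => PySem.Int.mod n 2 == 0)
          = num :: t.filter (fun n => PySem.Int.mod n 2 == 0) := by
        rw [List.filter_cons, if_pos h]
      have hf2 : (num :: t).filter (fun n => !(PySem.Int.mod n 2 == 0))
          = t.filter (fun n => !(PySem.Int.mod n 2 == 0)) := by
        rw [List.filter_cons, if_neg (by rw [h]; decide)]
      rw [step, ih fo (if ec = 0 then num else fe) oc (ec + 1) hoc (by omega), hf1, hf2]
      refine Prod.ext rfl (Prod.ext ?_ (Prod.ext rfl ?_))
      · have hne : ¬ (ec + 1 = 0) := by omega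
        simp only [hne, if_false]
        by_cases hec0 : ec = 0 <;> simp [hec0]
      · simp only [List.length_cons]; push_cast; ring
    · have step : foeLoop (num :: t) fo fe oc ec
          = foeLoop t (if oc = 0 then num else fo) fe (oc + 1) ec := by
        show (if (PySem.Int.mod num 2 == 0) = true
            then foeLoop t fo (if ec = 0 then num else fe) oc (ec + 1)
            else foeLoop t (if oc = 0 then num else fo) fe (oc + 1) ec) = _
        rw [if_neg h]
      have hf1 : (num :: t).filter (fun n => PySem.Int.mod n 2 == 0)
          = t.filter (fun n => PySem.Int.mod n 2 == 0) := by
        rw [List.filter_cons, if_neg h]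
      have hf2 : (num :: t).filter (fun n => !(PySem.Int.mod n 2 == 0))
          = num :: t.filter (fun n => !(PySem.Int.mod n 2 == 0)) := by
        rw [List.filter_cons, if_pos (by rw [Bool.not_eq_true] at h; rw [h]; decide)]
      rw [step, ih (if oc = 0 then num else fo) fe (oc + 1) ec (by omega) hec, hf1, hf2]
      refine Prod.ext ?_ (Prod.ext rfl (Prod.ext ?_ rfl))
      · have hne : ¬ (oc + 1 = 0) := by omega
        simp only [hne, if_false]
        by_cases hoc0 : oc = 0 <;> simp [hoc0]
      · simp only [List.length_cons]; push_cast; ring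

-- ===== VERDICT (by name: the statement is the Claim_ definition above) =====
theorem first_odd_or_even_spec : Claim_equal_first_odd_or_even := by
  intro numbers _
  show first_odd_or_even numbers = first_odd_or_even_alt numbers
  unfold first_odd_or_even first_odd_or_even_alt
  rw [foeLoop_eq numbers 0 0 0 0 le_rfl le_rfl]
  simp only [if_pos rfl, zero_add, List.isEmpty_iff, Int.natCast_inj, beq_iff_eq,
    Bool.or_eq_true, decide_eq_true_eq, ← List.length_eq_zero_iff]
  set a := (numbers.filter (fun n => !(PySem.Int.mod n 2 == 0))).length with ha
  set b := (numbers.filter (fun n => PySem.Int.mod n 2 == 0)).length with hb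
  split_ifs <;> first | rfl | omega
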